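-- pv_equiv track=rewrite | github.com/joonion/computational-thinking-for-coding | Chap.03.Recursion/6615.콜라츠추측/solve.py | solve
-- ===== SOURCE A (Python) =====
-- def collatz(n):
--     seq = [n]
--     while n != 1:
--         n = n // 2 if n % 2 == 0 else 3 * n + 1
--         seq.append(n)
--     return seq
--
-- def solve(A, B):
--     a = collatz(A)[::-1]
--     b = collatz(B)[::-1]
--     minlen = min(len(a), len(b))
--     i = 0
--     while True:
--         if i == minlen or a[i] != b[i]:
--             break
--         i += 1
--     return len(a) - i, len(b) - i, a[i - 1]
-- ===== SOURCE B (Python) =====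
-- def collatz(n):
--     seq = [n]
--     while n != 1:
--         n = n // 2 if n % 2 == 0 else 3 * n + 1
--         seq.append(n)
--     return seq
--
-- def solve(A, B):
--     # Collatz sequences are deterministic: once they share a value they coincide
--     # to the end, so the FIRST value of collatz(A) found in collatz(B) is the
--     # merge point; its two indices are the divergent step counts.
--     pos = {v: q for q, v in enumerate(collatz(B))}
--     for p, v in enumerate(collatz(A)):
--         if v in pos:
--             return p, pos[v], v
-- ===== Notes on version B (the rewrite author's own statement) =====
-- stated objective: alternative
-- what changed: A reverses both Collatz sequences and walks them in lockstep to find the common-prefix length; B instead builds a value-to-index dict of collatz(B) once and makes a single forward scan of collatz(A) for the first shared value (sequences merge deterministically), reading off both indices directly.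
import Mathlib
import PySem

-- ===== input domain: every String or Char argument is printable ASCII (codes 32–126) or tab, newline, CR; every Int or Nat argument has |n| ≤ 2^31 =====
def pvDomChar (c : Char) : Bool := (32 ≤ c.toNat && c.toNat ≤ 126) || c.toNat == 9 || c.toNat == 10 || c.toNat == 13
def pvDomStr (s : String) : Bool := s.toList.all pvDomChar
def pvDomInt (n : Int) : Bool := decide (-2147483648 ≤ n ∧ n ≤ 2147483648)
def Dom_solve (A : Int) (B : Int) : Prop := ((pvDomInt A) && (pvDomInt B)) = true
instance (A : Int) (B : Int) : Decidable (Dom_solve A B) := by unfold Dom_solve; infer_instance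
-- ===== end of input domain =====

-- B replaces A's reverse-both-lists-and-compare scan by a value→index map of collatz(B)
-- and a single forward scan of collatz(A) for the first shared value (objective: alternative).

-- ===== PORT A =====
-- one Collatz update step: n = n // 2 if n % 2 == 0 else 3 * n + 1
def collatzStep (n : Int) : Int :=
  if PySem.Int.mod n 2 = 0 then PySem.Int.floordiv n 2 else 3 * n + 1

-- The Python 'while n != 1' loop is unbounded, so the port iterates it with fuel.
-- 2000 steps cover EVERY input of Dom_solve on which the Python loop terminates: the
-- longest Collatz trajectory of any |n| ≤ 2^31 has 1000 steps (record n = 1412987847);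
-- Pre_solve below restricts the claim to the terminating inputs, so the fuel is never
-- exhausted where the claim applies.
def collatzFuel : Nat := 2000

-- elements appended after n by the while loop (cons-building the same list A appends to)
def collatzTail : Nat → Int → List Int
  | 0, _ => []
  | f + 1, n =>
    if n = 1 then []
    else collatzStep n :: collatzTail f (collatzStep n)

def collatz (n : Int) : List Int := n :: collatzTail collatzFuel n

-- the 'while True: if i == minlen or a[i] != b[i]: break' loop: length of the common prefix
def lcpLen : List Int → List Int → Nat
  | x :: xs, y :: ys => if x = y then lcpLen xs ys + 1 else 0
  | _, _ => 0

def solve (A : Int) (B : Int) : Int × Int × Int :=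
  let a := (collatz A).reverse
  let b := (collatz B).reverse
  let i := lcpLen a b
  -- a[i - 1]: always in range (-1 ≤ i-1 ≤ len a - 1 and a is nonempty), so getD 0 is never used
  ((a.length : Int) - (i : Int), (b.length : Int) - (i : Int),
    (PySem.List.pyGet? a ((i : Int) - 1)).getD 0)

-- ===== PORT B =====
-- {v: q for q, v in enumerate(collatz(B))}
def posDict (sb : List Int) : PySem.Dict Int Int :=
  (PySem.List.enumerate sb).foldl (fun d p => d.insert p.2 p.1) PySem.Dict.empty

-- 'for p, v in enumerate(collatz(A)): if v in pos: return p, pos[v], v'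
-- the [] case is the loop falling through, unreachable in Source B (1 is in both sequences)
def scanPos (pos : PySem.Dict Int Int) (p : Int) : List Int → Int × Int × Int
  | [] => (0, 0, 0)
  | v :: rest =>
    match pos.get? v with
    | some q => (p, q, v)
    | none => scanPos pos (p + 1) rest

def solve_alt (A : Int) (B : Int) : Int × Int × Int :=
  scanPos (posDict (collatz B)) 0 (collatz A)

-- ===== PRECONDITION & SPEC =====
-- Pre_ excludes exactly the inputs on which A DIVERGES (its 'while n != 1' loop never
-- terminates: within Dom_solve these are the inputs with A ≤ 0 or B ≤ 0, whose
-- trajectories stay nonpositive or cycle and never reach 1); the 2000-iteration bound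
-- is only the decision procedure for that termination, NOT a size cap: within Dom_solve
-- (|n| ≤ 2^31, which every claim below assumes) the longest terminating trajectory has
-- 1000 steps (n = 1412987847), so Pre_ admits every input in Dom on which A returns.
def Pre_solve (A : Int) (B : Int) : Prop :=
  1 ∈ List.iterate collatzStep A (collatzFuel + 1) ∧ 1 ∈ List.iterate collatzStep B (collatzFuel + 1)
instance (A : Int) (B : Int) : Decidable (Pre_solve A B) := by unfold Pre_solve; infer_instance

def pvWitness_solve : Int × Int := (3, 5)

def Spec_solve (A : Int) (B : Int) (out : Int × Int × Int) : Prop := out = solve_alt A B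
instance (A : Int) (B : Int) (out : Int × Int × Int) : Decidable (Spec_solve A B out) := by unfold Spec_solve; infer_instance

-- ===== CLAIM (what is proved, stated in full; the proofs are below) =====
def Claim_equal_solve : Prop := ∀ (A : Int) (B : Int), Dom_solve A B → Pre_solve A B → Spec_solve A B (solve A B)

-- ===== LEMMAS AND PROOFS =====

-- the canonical trajectory [n, step n, ..., step^[s] n]
def trajL (n : Int) (s : Nat) : List Int :=
  (List.range (s + 1)).map (fun j => collatzStep^[j] n)

theorem length_trajL (n : Int) (s : Nat) : (trajL n s).length = s + 1 := by
  simp [trajL]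

theorem getElem_trajL (n : Int) (s j : Nat) (h : j < s + 1) :
    (trajL n s)[j]'(by simpa [length_trajL] using h) = collatzStep^[j] n := by
  simp only [trajL, List.getElem_map, List.getElem_range]

theorem mem_trajL (w : Int) (n : Int) (s : Nat) :
    w ∈ trajL n s ↔ ∃ j, j < s + 1 ∧ collatzStep^[j] n = w := by
  simp only [trajL, List.mem_map, List.mem_range]

theorem getElem?_trajL (n : Int) (s j : Nat) (h : j < s + 1) :
    (trajL n s)[j]? = some (collatzStep^[j] n) := by
  simp only [trajL]
  rw [List.getElem?_map, List.getElem?_range h]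
  rfl

theorem trajL_succ (n : Int) (s : Nat) : trajL n (s + 1) = n :: trajL (collatzStep n) s := by
  unfold trajL
  rw [List.range_succ_eq_map]
  simp only [List.map_cons, Function.iterate_zero, id, List.map_map]
  rfl

theorem collatzTail_one (f : Nat) : collatzTail f 1 = [] := by
  cases f <;> simp [collatzTail]

theorem collatz_eq_trajL (s : Nat) : ∀ (n : Int) (f : Nat),
    (∀ j, j < s → collatzStep^[j] n ≠ 1) → collatzStep^[s] n = 1 → s ≤ f →
    n :: collatzTail f n = trajL n s := by
  induction s with
  | zero =>
    intro n f _ h1 _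
    simp only [Function.iterate_zero, id] at h1
    subst h1
    simp [collatzTail_one, trajL]
  | succ s ih =>
    intro n f hmin hs hf
    have hn1 : n ≠ 1 := by simpa using hmin 0 (Nat.succ_pos s)
    obtain ⟨f', rfl⟩ : ∃ f', f = f' + 1 := ⟨f - 1, by omega⟩
    have hstep : collatzTail (f' + 1) n = collatzStep n :: collatzTail f' (collatzStep n) := by
      simp [collatzTail, hn1]
    have ih' : collatzStep n :: collatzTail f' (collatzStep n) = trajL (collatzStep n) s := by
      apply ih
      · intro j hj
        have := hmin (j + 1) (by omega)
        simpa [Function.iterate_succ_apply] using this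
      · simpa [Function.iterate_succ_apply] using hs
      · omega
    rw [hstep, ih', trajL_succ]

-- s is the exact stopping time of n
def StopAt (n : Int) (s : Nat) : Prop :=
  collatzStep^[s] n = 1 ∧ ∀ j, j < s → collatzStep^[j] n ≠ 1

theorem reach_of_mem_iterate {n : Int} (h : 1 ∈ List.iterate collatzStep n (collatzFuel + 1)) :
    ∃ k, k ≤ collatzFuel ∧ collatzStep^[k] n = 1 := by
  obtain ⟨i, hi, he⟩ := List.mem_iff_getElem.mp h
  rw [List.length_iterate] at hi
  rw [List.getElem_iterate] at he
  exact ⟨i, by omega, he⟩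

theorem stopAt_unique {n : Int} {s t : Nat} (h1 : StopAt n s) (h2 : StopAt n t) : s = t := by
  rcases Nat.lt_trichotomy s t with h | h | h
  · exact absurd h1.1 (h2.2 s h)
  · exact h
  · exact absurd h2.1 (h1.2 t h)

theorem stopAt_shift {n : Int} {s : Nat} (h : StopAt n s) (p : Nat) (hp : p ≤ s) :
    StopAt (collatzStep^[p] n) (s - p) := by
  constructor
  · rw [← Function.iterate_add_apply]
    have : s - p + p = s := by omega
    rw [this]; exact h.1
  · intro j hj
    rw [← Function.iterate_add_apply]
    exact h.2 (j + p) (by omega)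

theorem merge_balance {A B : Int} {sa sb : Nat} (ha : StopAt A sa) (hb : StopAt B sb)
    (p q : Nat) (hp : p ≤ sa) (hq : q ≤ sb) (he : collatzStep^[p] A = collatzStep^[q] B) :
    sa - p = sb - q := by
  have h1 := stopAt_shift ha p hp
  have h2 := stopAt_shift hb q hq
  rw [← he] at h2
  exact stopAt_unique h1 h2

theorem nodup_trajL {n : Int} {s : Nat} (h : StopAt n s) : (trajL n s).Nodup := by
  apply List.Nodup.map_on _ (List.nodup_range)
  intro j hj j' hj' he
  simp only [List.mem_range] at hj hj'
  have := merge_balance h h j j' (by omega) (by omega) he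
  omega

theorem lcpLen_eq (i : Nat) : ∀ (xs ys : List Int),
    (∀ j, j < i → xs[j]? = ys[j]? ∧ xs[j]? ≠ none) →
    (xs[i]? = none ∨ ys[i]? = none ∨ xs[i]? ≠ ys[i]?) →
    lcpLen xs ys = i := by
  induction i with
  | zero =>
    intro xs ys _ h2
    match xs, ys with
    | [], [] => rfl
    | [], _ :: _ => rfl
    | _ :: _, [] => rfl
    | x :: xs', y :: ys' =>
      have hne : x ≠ y := by
        intro he
        rcases h2 with h | h | h <;> simp [he] at h
      simp [lcpLen, hne]
  | succ i ih =>
    intro xs ys h1 h2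
    obtain ⟨hxy, hx⟩ := h1 0 (Nat.succ_pos i)
    match xs, ys with
    | [], _ => simp at hx
    | x :: xs', [] => simp at hxy
    | x :: xs', y :: ys' =>
      have hxy' : x = y := by simpa using hxy
      simp only [lcpLen, if_pos hxy']
      have : lcpLen xs' ys' = i := by
        apply ih
        · intro j hj
          have := h1 (j + 1) (by omega)
          simpa using this
        · simpa using h2
      omega

theorem scanPos_eq (pos : PySem.Dict Int Int) :
    ∀ (l : List Int) (p0 : Int) (m : Nat) (q : Int) (hm : m < l.length),
    (∀ j (hj : j < m), pos.get? (l[j]'(by omega)) = none) →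
    pos.get? (l[m]'hm) = some q →
    scanPos pos p0 l = (p0 + (m : Int), q, l[m]'hm) := by
  intro l
  induction l with
  | nil => intro p0 m q hm _ _; simp at hm
  | cons v rest ih =>
    intro p0 m q hm hnone hsome
    match m with
    | 0 =>
      simp only [List.getElem_cons_zero] at hsome ⊢
      simp [scanPos, hsome]
    | m + 1 =>
      have h0 : pos.get? v = none := by simpa using hnone 0 (Nat.succ_pos m)
      simp only [scanPos, h0]
      have := ih (p0 + 1) m q (by simpa using hm)
        (fun j hj => by simpa using hnone (j + 1) (by omega))
        (by simpa using hsome)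
      rw [this, List.getElem_cons_succ]
      congr 1
      push_cast; ring

theorem items_posDict (sb : List Int) (h : sb.Nodup) :
    (posDict sb).items = (PySem.List.enumerate sb).map (fun p => (p.2, p.1)) := by
  have := PySem.Dict.items_foldl_insert_fresh (l := PySem.List.enumerate sb)
    (k := fun p => p.2) (v := fun p => p.1) (d := PySem.Dict.empty)
    (by intro a _; simp [PySem.Dict.contains_empty])
    (by rw [PySem.List.map_snd_enumerate]; exact h)
  simpa [posDict] using this

theorem keys_posDict (sb : List Int) (h : sb.Nodup) : (posDict sb).keys = sb := by
  show (posDict sb).items.map (·.1) = sb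
  rw [items_posDict sb h, List.map_map]
  have : ((fun (p : Int × Int) => p.1) ∘ fun p => (p.2, p.1)) = fun (p : Int × Int) => p.2 := rfl
  rw [this]
  exact PySem.List.map_snd_enumerate sb 0

theorem get?_posDict_some (sb : List Int) (h : sb.Nodup) (k : Nat) (hk : k < sb.length) :
    (posDict sb).get? (sb[k]'hk) = some (k : Int) := by
  apply PySem.Dict.get?_of_mem_items
  · rw [items_posDict sb h]
    apply List.mem_map.mpr
    refine ⟨((k : Int), sb[k]'hk), ?_, rfl⟩
    rw [PySem.List.mem_enumerate_iff]
    exact ⟨k, hk, by simp⟩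
  · rw [keys_posDict sb h]; exact h

theorem get?_posDict_none (sb : List Int) (h : sb.Nodup) (w : Int) (hw : w ∉ sb) :
    (posDict sb).get? w = none := by
  rw [PySem.Dict.get?_eq_none_iff_not_mem_keys, keys_posDict sb h]
  exact hw

-- ===== VERDICT (by name: the statement is the Claim_ definition above) =====
theorem solve_spec : Claim_equal_solve := by
  intro A B _hdom hpre
  unfold Spec_solve
  obtain ⟨hpa, hpb⟩ := hpre
  obtain ⟨ka, hka, hka1⟩ := reach_of_mem_iterate hpa
  obtain ⟨kb, hkb, hkb1⟩ := reach_of_mem_iterate hpb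
  have hexA : ∃ k, collatzStep^[k] A = 1 := ⟨ka, hka1⟩
  have hexB : ∃ k, collatzStep^[k] B = 1 := ⟨kb, hkb1⟩
  set sa := Nat.find hexA with hsa_def
  set sb := Nat.find hexB with hsb_def
  have hstopA : StopAt A sa := ⟨Nat.find_spec hexA, fun j hj => Nat.find_min hexA hj⟩
  have hstopB : StopAt B sb := ⟨Nat.find_spec hexB, fun j hj => Nat.find_min hexB hj⟩
  have hsa_le : sa ≤ collatzFuel := le_trans (Nat.find_min' hexA hka1) hka
  have hsb_le : sb ≤ collatzFuel := le_trans (Nat.find_min' hexB hkb1) hkb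
  have hUA : collatz A = trajL A sa :=
    collatz_eq_trajL sa A collatzFuel hstopA.2 hstopA.1 hsa_le
  have hUB : collatz B = trajL B sb :=
    collatz_eq_trajL sb B collatzFuel hstopB.2 hstopB.1 hsb_le
  -- m: first index of collatz(A) whose value occurs in collatz(B)
  have hexm : ∃ p, collatzStep^[p] A ∈ trajL B sb :=
    ⟨sa, (mem_trajL _ B sb).mpr ⟨sb, by omega, by rw [hstopB.1, hstopA.1]⟩⟩
  set m := Nat.find hexm with hm_def
  have hmem : collatzStep^[m] A ∈ trajL B sb := Nat.find_spec hexm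
  have hmin : ∀ p, p < m → collatzStep^[p] A ∉ trajL B sb := fun p hp => Nat.find_min hexm hp
  have hm_le : m ≤ sa := Nat.find_min' hexm ((mem_trajL _ B sb).mpr ⟨sb, by omega, by rw [hstopB.1, hstopA.1]⟩)
  obtain ⟨q, hq_lt, hqe⟩ := (mem_trajL _ B sb).mp hmem
  have hbal : sa - m = sb - q :=
    merge_balance hstopA hstopB m q hm_le (by omega) hqe.symm
  have hndB : (trajL B sb).Nodup := nodup_trajL hstopB
  -- ===== B side =====
  have hB : solve_alt A B = ((m : Int), (q : Int), collatzStep^[m] A) := by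
    show scanPos (posDict (collatz B)) 0 (collatz A) = _
    rw [hUA, hUB]
    have := scanPos_eq (posDict (trajL B sb)) (trajL A sa) 0 m (q : Int)
      (by rw [length_trajL]; omega)
      (fun j hj => by
        rw [getElem_trajL A sa j (by omega)]
        exact get?_posDict_none _ hndB _ (hmin j hj))
      (by
        rw [getElem_trajL A sa m (by omega)]
        have h1 : ((trajL B sb)[q]'(by rw [length_trajL]; omega)) = collatzStep^[m] A := by
          rw [getElem_trajL B sb q hq_lt]; exact hqe
        have h2 := get?_posDict_some (trajL B sb) hndB q (by rw [length_trajL]; omega)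
        rw [h1] at h2
        exact h2)
    rw [this, getElem_trajL A sa m (by omega)]
    simp
  -- ===== A side =====
  set i := sa + 1 - m with hi_def
  -- common elements of the two reversed lists
  have hrevA : ∀ j, j < sa + 1 →
      ((trajL A sa).reverse)[j]? = some (collatzStep^[sa - j] A) := by
    intro j hj
    rw [List.getElem?_reverse (by rw [length_trajL]; omega)]
    rw [show (trajL A sa).length - 1 - j = sa - j by rw [length_trajL]; omega]
    exact getElem?_trajL A sa (sa - j) (by omega)
  have hrevB : ∀ j, j < sb + 1 →
      ((trajL B sb).reverse)[j]? = some (collatzStep^[sb - j] B) := by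
    intro j hj
    rw [List.getElem?_reverse (by rw [length_trajL]; omega)]
    rw [show (trajL B sb).length - 1 - j = sb - j by rw [length_trajL]; omega]
    exact getElem?_trajL B sb (sb - j) (by omega)
  have hcommon : ∀ j, j ≤ sa - m → collatzStep^[sa - j] A = collatzStep^[sb - j] B := by
    intro j hj
    have h1 : sa - j = (sa - m - j) + m := by omega
    have h2 : sb - j = (sa - m - j) + q := by omega
    rw [h1, h2, Function.iterate_add_apply, Function.iterate_add_apply, hqe]
  have hlcp : lcpLen ((trajL A sa).reverse) ((trajL B sb).reverse) = i := by
    apply lcpLen_eq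
    · intro j hj
      have hja : j < sa + 1 := by omega
      have hjb : j < sb + 1 := by omega
      rw [hrevA j hja, hrevB j hjb, hcommon j (by omega)]
      simp
    · by_cases hm0 : m = 0
      · left
        apply List.getElem?_eq_none
        rw [List.length_reverse, length_trajL]; omega
      · by_cases hq0 : q = 0
        · right; left
          apply List.getElem?_eq_none
          rw [List.length_reverse, length_trajL]; omega
        · right; right
          rw [hrevA i (by omega), hrevB i (by omega)]
          simp only [ne_eq, Option.some.injEq]
          intro he
          have h1 : sa - i = m - 1 := by omega
          have h2 : sb - i = q - 1 := by omega
          rw [h1, h2] at he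
          exact hmin (m - 1) (by omega)
            ((mem_trajL _ B sb).mpr ⟨q - 1, by omega, he.symm⟩)
  have hA : solve A B = ((m : Int), (q : Int), collatzStep^[m] A) := by
    show ((((collatz A).reverse).length : Int) - (lcpLen (collatz A).reverse (collatz B).reverse : Int),
          (((collatz B).reverse).length : Int) - (lcpLen (collatz A).reverse (collatz B).reverse : Int),
          (PySem.List.pyGet? (collatz A).reverse ((lcpLen (collatz A).reverse (collatz B).reverse : Int) - 1)).getD 0) = _
    rw [hUA, hUB, hlcp]
    have hcast : ((i : Int) - 1) = ((i - 1 : Nat) : Int) := by omega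
    rw [hcast, PySem.List.pyGet?_natCast]
    rw [hrevA (i - 1) (by omega)]
    rw [show sa - (i - 1) = m by omega]
    simp only [List.length_reverse, length_trajL, Option.getD_some]
    refine congrArg₂ _ (by push_cast; omega) (congrArg₂ _ (by push_cast; omega) rfl)
  rw [hA, hB]
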